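-- pv_equiv track=rewrite | github.com/JoshuaDowdCS/HeXO-Bot | utils.py | get_cells_within_distance
-- ===== SOURCE A (Python) =====
-- _DIST_OFFSETS_CACHE = {}
--
-- def get_cells_within_distance(center, dist):
--     """Return all (q, r) cells within a given distance from a center (q, r)."""
--     if dist not in _DIST_OFFSETS_CACHE:
--         offsets = []
--         for dq in range(0 - dist, dist + 1):
--             for dr in range(max(0 - dist, (0 - dq) - dist), min(dist, (0 - dq) + dist) + 1):
--                 offsets.append((dq, dr))
--         _DIST_OFFSETS_CACHE[dist] = offsets
--
--     qc, rc = center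
--     return [(qc + dq, rc + dr) for dq, dr in _DIST_OFFSETS_CACHE[dist]]
-- ===== SOURCE B (Python) =====
-- def get_cells_within_distance(center, dist):
--     """Return all (q, r) cells within a given distance from a center (q, r)."""
--     qc, rc = center
--     return [(qc + dq, rc + dr)
--             for dq in range(-dist, dist + 1)
--             for dr in range(-dist, dist + 1)
--             if (abs(dq) + abs(dr) + abs(dq + dr)) // 2 <= dist]
-- ===== Notes on version B (the rewrite author's own statement) =====
-- stated objective: idiomatic
-- what changed: B drops the module-level offsets cache and replaces A's per-row bound arithmetic (contiguous dr interval computed with max/min) by a single generate-and-test comprehension over the full square that keeps (dq,dr) exactly when the hex distance (|dq|+|dr|+|dq+dr|)//2 is within dist.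
import Mathlib
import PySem

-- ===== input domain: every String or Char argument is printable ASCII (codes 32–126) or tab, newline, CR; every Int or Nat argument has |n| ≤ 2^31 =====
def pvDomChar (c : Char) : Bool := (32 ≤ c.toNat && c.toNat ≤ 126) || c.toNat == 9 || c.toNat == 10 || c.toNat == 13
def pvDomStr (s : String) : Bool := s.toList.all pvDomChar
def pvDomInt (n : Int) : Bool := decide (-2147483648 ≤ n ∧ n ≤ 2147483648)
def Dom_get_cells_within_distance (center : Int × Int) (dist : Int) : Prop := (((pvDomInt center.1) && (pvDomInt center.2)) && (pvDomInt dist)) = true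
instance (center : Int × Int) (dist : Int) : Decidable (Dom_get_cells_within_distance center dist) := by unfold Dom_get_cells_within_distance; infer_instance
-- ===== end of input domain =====

-- B replaces A's per-row min/max bound arithmetic (and its module-level cache) with an idiomatic
-- generate-and-test comprehension over the full square filtered by the hex distance; same cost.
-- ===== PORT A =====
-- A drops a module-level cache that never changes the returned value; only the return value is ported.
def get_cells_within_distance (center : Int × Int) (dist : Int) : List (Int × Int) :=
  let offsets : List (Int × Int) :=
    (PySem.List.pyRange (0 - dist) (dist + 1) 1).foldl
      (fun acc dq =>
        acc ++ (PySem.List.pyRange (max (0 - dist) ((0 - dq) - dist)) (min dist ((0 - dq) + dist) + 1) 1).map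
          (fun dr => (dq, dr)))
      []
  let qc := center.1
  let rc := center.2
  offsets.map (fun p => (qc + p.1, rc + p.2))

-- ===== PORT B =====
def get_cells_within_distance_alt (center : Int × Int) (dist : Int) : List (Int × Int) :=
  let qc := center.1
  let rc := center.2
  (PySem.List.pyRange (-dist) (dist + 1) 1).flatMap
    (fun dq =>
      ((PySem.List.pyRange (-dist) (dist + 1) 1).filter
          (fun dr => decide (PySem.Int.floordiv (|dq| + |dr| + |dq + dr|) 2 ≤ dist))).map
        (fun dr => (qc + dq, rc + dr)))

-- ===== PRECONDITION & SPEC =====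
def Spec_get_cells_within_distance (center : Int × Int) (dist : Int) (out : List (Int × Int)) : Prop := out = get_cells_within_distance_alt center dist
instance (center : Int × Int) (dist : Int) (out : List (Int × Int)) : Decidable (Spec_get_cells_within_distance center dist out) := by unfold Spec_get_cells_within_distance; infer_instance

-- ===== CLAIM (what is proved, stated in full; the proofs are below) =====
def Claim_equal_get_cells_within_distance : Prop := ∀ (center : Int × Int) (dist : Int), Dom_get_cells_within_distance center dist → Spec_get_cells_within_distance center dist (get_cells_within_distance center dist)

-- ===== LEMMAS AND PROOFS =====


lemma flatMap_congr_mem {α β : Type} (l : List α) (f g : α → List β)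
    (h : ∀ x ∈ l, f x = g x) : l.flatMap f = l.flatMap g := by
  induction l with
  | nil => rfl
  | cons a t ih =>
    simp only [List.flatMap_cons]
    rw [h a (List.mem_cons_self), ih (fun x hx => h x (List.mem_cons_of_mem _ hx))]

lemma filter_pyRange_interval (a b lo hi : Int) :
    (PySem.List.pyRange a b 1).filter (fun x => decide (lo ≤ x ∧ x ≤ hi))
      = PySem.List.pyRange (max a lo) (min b (hi + 1)) 1 := by
  have hs1 : ((PySem.List.pyRange a b 1).filter
      (fun x => decide (lo ≤ x ∧ x ≤ hi))).Pairwise (· < ·) :=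
    (PySem.List.pairwise_lt_pyRange_one a b).filter _
  have hs2 := PySem.List.pairwise_lt_pyRange_one (max a lo) (min b (hi + 1))
  have hmem : ∀ x : Int, x ∈ (PySem.List.pyRange a b 1).filter
      (fun x => decide (lo ≤ x ∧ x ≤ hi)) ↔ x ∈ PySem.List.pyRange (max a lo) (min b (hi + 1)) 1 := by
    intro x
    simp only [List.mem_filter, PySem.List.mem_pyRange_one, decide_eq_true_eq]
    omega
  have hperm : (PySem.List.pyRange a b 1).filter (fun x => decide (lo ≤ x ∧ x ≤ hi))
      |>.Perm (PySem.List.pyRange (max a lo) (min b (hi + 1)) 1) :=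
    (List.perm_ext_iff_of_nodup hs1.nodup hs2.nodup).mpr hmem
  exact hperm.eq_of_pairwise (fun x y _ _ hxy hyx => absurd hyx (not_lt.2 hxy.le)) hs1 hs2

lemma pred_eq_interval (dist dq dr : Int) (hdq : -dist ≤ dq ∧ dq < dist + 1)
    (hdr : -dist ≤ dr ∧ dr < dist + 1) :
    (decide (PySem.Int.floordiv (|dq| + |dr| + |dq + dr|) 2 ≤ dist))
      = decide (-dq - dist ≤ dr ∧ dr ≤ -dq + dist) := by
  rw [PySem.Int.floordiv_eq_ediv_of_pos (by norm_num)]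
  have h1 := abs_cases dq
  have h2 := abs_cases dr
  have h3 := abs_cases (dq + dr)
  rcases h1 with ⟨e1, _⟩ | ⟨e1, _⟩ <;> rcases h2 with ⟨e2, _⟩ | ⟨e2, _⟩ <;>
    rcases h3 with ⟨e3, _⟩ | ⟨e3, _⟩ <;> rw [e1, e2, e3] <;>
    simp only [decide_eq_decide] <;> omega

lemma row_eq (dist dq qc rc : Int) (hdq : -dist ≤ dq ∧ dq < dist + 1) :
    (PySem.List.pyRange (max (-dist) (-dq - dist)) (min dist (-dq + dist) + 1) 1).map
        (fun dr => (qc + dq, rc + dr))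
      = ((PySem.List.pyRange (-dist) (dist + 1) 1).filter
          (fun dr => decide (PySem.Int.floordiv (|dq| + |dr| + |dq + dr|) 2 ≤ dist))).map
        (fun dr => (qc + dq, rc + dr)) := by
  congr 1
  rw [List.filter_congr (fun dr hdr => by
    have := (PySem.List.mem_pyRange_one).1 hdr
    exact pred_eq_interval dist dq dr hdq this)]
  rw [filter_pyRange_interval]
  congr 1 <;> omega

-- ===== VERDICT (by name: the statement is the Claim_ definition above) =====
theorem get_cells_within_distance_spec : Claim_equal_get_cells_within_distance := by
  intro center dist _
  unfold Spec_get_cells_within_distance get_cells_within_distance get_cells_within_distance_alt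
  simp only [zero_sub]
  rw [PySem.List.foldl_append_eq_flatMap, List.nil_append, List.map_flatMap]
  refine flatMap_congr_mem _ _ _ (fun dq hdq => ?_)
  have hb := (PySem.List.mem_pyRange_one).1 hdq
  simp only [List.map_map, Function.comp_def]
  exact row_eq dist dq center.1 center.2 hb
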